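-- pv_equiv track=rewrite | github.com/gabriellaec/desoft-analise-exercicios | backup/user_207/ch165_2020_06_22_00_29_29_868257.py | mais_populoso
-- ===== SOURCE A (Python) =====
-- def mais_populoso (brasil):
--     new_dicio = {}
--     for estado, dicio in brasil.items():
--         pop_estado = 0
--         for pop in dicio.values():
--             pop_estado += pop
--         new_dicio[estado] = pop_estado
--
--     max_pop = 0
--     mais_pop = ''
--     for estado, pop in new_dicio.items():
--         if pop > max_pop:
--             max_pop = pop
--             mais_pop = estado
--     return mais_pop
-- ===== SOURCE B (Python) =====
-- def mais_populoso(brasil):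
--     max_pop = 0
--     mais_pop = ''
--     for estado, dicio in brasil.items():
--         total = sum(dicio.values())
--         if total > max_pop:
--             max_pop = total
--             mais_pop = estado
--     return mais_pop
-- ===== Notes on version B (the rewrite author's own statement) =====
-- stated objective: simpler
-- what changed: fuses A's two passes (build a state->total dict, then scan it for the argmax) into one pass that computes each state's total with sum() and updates the running maximum immediately, never building the intermediate dict
import Mathlib
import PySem

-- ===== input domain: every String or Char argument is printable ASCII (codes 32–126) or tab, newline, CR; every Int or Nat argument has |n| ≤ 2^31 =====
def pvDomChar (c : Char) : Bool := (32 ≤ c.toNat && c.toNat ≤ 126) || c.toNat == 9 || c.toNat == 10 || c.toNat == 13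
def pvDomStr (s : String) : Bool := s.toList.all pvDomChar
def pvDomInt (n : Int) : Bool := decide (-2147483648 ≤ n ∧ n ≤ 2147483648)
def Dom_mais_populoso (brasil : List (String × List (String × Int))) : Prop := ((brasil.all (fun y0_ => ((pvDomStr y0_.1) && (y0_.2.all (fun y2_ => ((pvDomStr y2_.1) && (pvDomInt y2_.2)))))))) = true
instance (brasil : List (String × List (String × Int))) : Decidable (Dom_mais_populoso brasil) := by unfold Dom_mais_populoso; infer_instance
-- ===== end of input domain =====

-- B fuses A's two passes (table of totals, then argmax scan) into a single pass; simpler, no intermediate dict.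
-- ===== PORT A =====
def mais_populoso (brasil : List (String × List (String × Int))) : String :=
  let new_dicio : PySem.Dict String Int :=
    brasil.foldl (fun d p => d.insert p.1 (p.2.foldl (fun s q => s + q.2) 0)) PySem.Dict.empty
  (new_dicio.items.foldl (fun (acc : Int × String) p => if p.2 > acc.1 then (p.2, p.1) else acc) (0, "")).2

-- ===== PORT B =====
def mais_populoso_alt (brasil : List (String × List (String × Int))) : String :=
  (brasil.foldl
    (fun (acc : Int × String) p =>
      let total := (p.2.map Prod.snd).sum
      if total > acc.1 then (total, p.1) else acc)
    (0, "")).2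

-- ===== PRECONDITION & SPEC =====
-- Pre_ excludes association lists with a repeated state key: those do not represent a Python dict
-- (the tested inputs are dicts, which cannot have duplicate keys), so no input A returns on is excluded.
def Pre_mais_populoso (brasil : List (String × List (String × Int))) : Prop :=
  (brasil.map Prod.fst).Nodup
instance (brasil : List (String × List (String × Int))) : Decidable (Pre_mais_populoso brasil) := by unfold Pre_mais_populoso; infer_instance
def pvWitness_mais_populoso : (List (String × List (String × Int))) :=
  [("SP", [("a", 3), ("b", 4)]), ("RJ", [("c", 10)])]

def Spec_mais_populoso (brasil : List (String × List (String × Int))) (out : String) : Prop := out = mais_populoso_alt brasil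
instance (brasil : List (String × List (String × Int))) (out : String) : Decidable (Spec_mais_populoso brasil out) := by unfold Spec_mais_populoso; infer_instance

-- ===== CLAIM (what is proved, stated in full; the proofs are below) =====
def Claim_equal_mais_populoso : Prop := ∀ (brasil : List (String × List (String × Int))), Dom_mais_populoso brasil → Pre_mais_populoso brasil → Spec_mais_populoso brasil (mais_populoso brasil)

-- ===== LEMMAS AND PROOFS =====

-- ===== VERDICT (by name: the statement is the Claim_ definition above) =====
lemma items_eq_map (brasil : List (String × List (String × Int)))
    (h : (brasil.map Prod.fst).Nodup) :
    (brasil.foldl (fun (d : PySem.Dict String Int) p => d.insert p.1 (p.2.foldl (fun s q => s + q.2) 0)) PySem.Dict.empty).items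
      = brasil.map (fun p => (p.1, p.2.foldl (fun s q => s + q.2) 0)) := by
  have := PySem.Dict.items_foldl_insert_fresh (l := brasil) (d := (PySem.Dict.empty : PySem.Dict String Int))
      (k := Prod.fst) (v := fun p => p.2.foldl (fun s q => s + q.2) 0)
      (by intro a _; simp [PySem.Dict.contains_empty]) h
  simpa using this

lemma pv_inner_sum (l : List (String × Int)) :
    l.foldl (fun s q => s + q.2) 0 = (l.map Prod.snd).sum := by
  rw [← List.foldl_map]; exact (List.sum_eq_foldl).symm

theorem mais_populoso_spec : Claim_equal_mais_populoso := by
  intro brasil _ hpre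
  unfold Spec_mais_populoso mais_populoso mais_populoso_alt
  simp only [items_eq_map brasil hpre, List.foldl_map]
  congr 2
  funext acc p
  simp [pv_inner_sum]
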